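-- pv_equiv track=rewrite | github.com/KaikoClanworth1/igb-blender | actor/enbaya_encoder.py | _compute_samples
-- ===== SOURCE A (Python) =====
-- def _compute_samples(quantized, num_tracks, largest_count):
--     """Compute second-order delta samples per track.
--
--     Returns list (per track) of lists (per frame) of
--     [(value, has_value)] × 7 components.
--     """
--     all_samples = []
--
--     for track_id in range(num_tracks):
--         qdata = quantized[track_id]
--         num_frames = len(qdata)
--
--         # Pad to largest_count if needed
--         while len(qdata) < largest_count:
--             qdata.append(qdata[-1] if qdata else (0, 0, 0, 0, 0, 0, 0))
--
--         samples = []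
--         for comp in range(7):
--             prev_delta = 0
--             prev_val = qdata[0][comp]
--
--             # Frame 0: raw value
--             comp_samples = [(prev_val, True)]
--
--             for j in range(1, largest_count):
--                 cur_val = qdata[j][comp] if j < len(qdata) else qdata[-1][comp]
--                 delta = cur_val - prev_val
--                 dod = delta - prev_delta  # delta-of-delta
--                 comp_samples.append((dod, True))
--                 prev_val = cur_val
--                 prev_delta = delta
--
--             # Store per-component
--             if not samples:
--                 samples = [[] for _ in range(largest_count)]
--             for f in range(largest_count):
--                 if len(samples[f]) < 7:
--                     samples[f].append(comp_samples[f])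
--                 else:
--                     samples[f][comp] = comp_samples[f]
--
--         all_samples.append(samples)
--
--     return all_samples
-- ===== SOURCE B (Python) =====
-- def _compute_samples(quantized, num_tracks, largest_count):
--     """Row-major second-order delta-of-delta samples per track."""
--     all_samples = []
--     for track_id in range(num_tracks):
--         qdata = quantized[track_id]
--         while len(qdata) < largest_count:
--             qdata.append(qdata[-1] if qdata else (0, 0, 0, 0, 0, 0, 0))
--         prev_val = [qdata[0][c] for c in range(7)]
--         prev_delta = [0] * 7
--         samples = []
--         if largest_count >= 1:
--             samples.append([(v, True) for v in prev_val])
--         for j in range(1, largest_count):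
--             row = []
--             for c in range(7):
--                 delta = qdata[j][c] - prev_val[c]
--                 row.append((delta - prev_delta[c], True))
--                 prev_val[c] = qdata[j][c]
--                 prev_delta[c] = delta
--             samples.append(row)
--         all_samples.append(samples)
--     return all_samples
-- ===== Notes on version B (the rewrite author's own statement) =====
-- stated objective: simpler
-- what changed: Replaced A's component-outer pass (7 per-component delta streams later interleaved frame-by-frame into rows via a separate append/assign reassembly loop) with a single row-major pass that keeps prev_val/prev_delta arrays and emits each 7-tuple frame directly, eliminating the transpose/reassembly step.
import Mathlib
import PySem

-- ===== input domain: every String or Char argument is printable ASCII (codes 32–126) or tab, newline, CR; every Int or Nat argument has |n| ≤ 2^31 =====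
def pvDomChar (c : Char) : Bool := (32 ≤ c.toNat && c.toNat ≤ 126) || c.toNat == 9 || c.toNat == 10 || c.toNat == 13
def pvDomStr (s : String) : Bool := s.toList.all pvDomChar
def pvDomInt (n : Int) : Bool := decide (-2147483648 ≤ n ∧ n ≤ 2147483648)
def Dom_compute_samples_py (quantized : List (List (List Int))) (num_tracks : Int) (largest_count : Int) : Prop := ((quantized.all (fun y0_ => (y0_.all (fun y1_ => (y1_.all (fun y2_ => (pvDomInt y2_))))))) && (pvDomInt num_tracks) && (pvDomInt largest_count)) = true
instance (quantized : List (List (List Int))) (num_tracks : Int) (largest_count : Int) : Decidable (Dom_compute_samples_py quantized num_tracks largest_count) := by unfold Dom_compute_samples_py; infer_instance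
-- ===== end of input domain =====

-- B replaces A's component-outer pass + frame reassembly with one row-major pass keeping
-- prev_val/prev_delta arrays (simpler decomposition, same cost). Both Pythons pad
-- quantized[track] in place identically; the equivalence proved here is about the return value.


-- ===== PORT A =====
-- the in-place padding loop `while len(qdata) < largest_count: qdata.append(qdata[-1] if qdata else (0,)*7)`
-- (identical line in both Pythons, so shared by both ports)
def pyPadTrack (q : List (List Int)) (lc : Int) : List (List Int) :=
  if (q.length : Int) < lc then
    pyPadTrack (q ++ [if q ≠ [] then PySem.List.pyGetD q (-1) [] else [0, 0, 0, 0, 0, 0, 0]]) lc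
  else q
termination_by (lc - q.length).toNat
decreasing_by simp_all; omega

-- the `for comp in range(7)` body building `comp_samples` (state: prev_val, prev_delta, comp_samples)
def compSamplesA (q : List (List Int)) (c : Nat) (lc : Int) : List (Int × Bool) :=
  let prev_val := PySem.List.pyGetD (PySem.List.pyGetD q 0 []) c 0
  let res := (PySem.List.pyRange 1 lc 1).foldl
    (fun (st : Int × Int × List (Int × Bool)) j =>
      let cur_val := if j < (q.length : Int) then PySem.List.pyGetD (PySem.List.pyGetD q j []) c 0
                     else PySem.List.pyGetD (PySem.List.pyGetD q (-1) []) c 0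
      let delta := cur_val - st.1
      let dod := delta - st.2.1
      (cur_val, delta, st.2.2 ++ [(dod, true)]))
    (prev_val, 0, [(prev_val, true)])
  res.2.2

-- the per-track body of A after padding: comp loop, then the append/assign reassembly into frames
def trackA (q : List (List Int)) (lc : Int) : List (List (Int × Bool)) :=
  (List.range 7).foldl
    (fun samples c =>
      let cs := compSamplesA q c lc
      let samples := if samples = [] then List.replicate lc.toNat ([] : List (Int × Bool)) else samples
      (PySem.List.pyRange 0 lc 1).foldl
        (fun samples f =>
          let row := PySem.List.pyGetD samples f []
          if (row.length : Int) < 7 then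
            samples.set f.toNat (row ++ [PySem.List.pyGetD cs f (0, true)])
          else
            samples.set f.toNat (row.set c (PySem.List.pyGetD cs f (0, true))))
        samples)
    []

def compute_samples_py (quantized : List (List (List Int))) (num_tracks : Int) (largest_count : Int) : List (List (List (Int × Bool))) :=
  (PySem.List.pyRange 0 num_tracks 1).foldl
    (fun all_samples tid =>
      let qdata := pyPadTrack (PySem.List.pyGetD quantized tid []) largest_count
      all_samples ++ [trackA qdata largest_count])
    []

-- ===== PORT B =====
-- the per-track body of B after padding: row-major pass with prev_val/prev_delta arrays
def trackB (q : List (List Int)) (lc : Int) : List (List (Int × Bool)) :=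
  let prev_val := (List.range 7).map (fun (c : Nat) => PySem.List.pyGetD (PySem.List.pyGetD q 0 []) (c : Int) 0)
  let prev_delta := List.replicate 7 (0 : Int)
  let samples : List (List (Int × Bool)) :=
    if (1 : Int) ≤ lc then [prev_val.map (fun v => (v, true))] else []
  let res := (PySem.List.pyRange 1 lc 1).foldl
    (fun (st : List Int × List Int × List (List (Int × Bool))) j =>
      let inner := (List.range 7).foldl
        (fun (acc : List (Int × Bool) × List Int × List Int) (c : Nat) =>
          let cur := PySem.List.pyGetD (PySem.List.pyGetD q j []) (c : Int) 0
          let delta := cur - acc.2.1.getD c 0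
          (acc.1 ++ [(delta - acc.2.2.getD c 0, true)], acc.2.1.set c cur, acc.2.2.set c delta))
        ([], st.1, st.2.1)
      (inner.2.1, inner.2.2, st.2.2 ++ [inner.1]))
    (prev_val, prev_delta, samples)
  res.2.2

def compute_samples_py_alt (quantized : List (List (List Int))) (num_tracks : Int) (largest_count : Int) : List (List (List (Int × Bool))) :=
  (PySem.List.pyRange 0 num_tracks 1).foldl
    (fun all_samples tid =>
      let qdata := pyPadTrack (PySem.List.pyGetD quantized tid []) largest_count
      all_samples ++ [trackB qdata largest_count])
    []

-- ===== PRECONDITION & SPEC =====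
-- Pre_ is exactly the inputs on which the Python A returns (no IndexError): every requested
-- track exists, a track that stays empty after padding (empty with largest_count ≤ 0) is excluded,
-- and every row the algorithm reads has at least 7 components.
def Pre_compute_samples_py (quantized : List (List (List Int))) (num_tracks : Int) (largest_count : Int) : Prop :=
  num_tracks ≤ (quantized.length : Int) ∧
  ∀ i < num_tracks.toNat,
    (quantized.getD i [] = [] → 1 ≤ largest_count) ∧
    ∀ j < min (quantized.getD i []).length (max largest_count.toNat 1),
      7 ≤ ((quantized.getD i []).getD j []).length
instance (quantized : List (List (List Int))) (num_tracks : Int) (largest_count : Int) : Decidable (Pre_compute_samples_py quantized num_tracks largest_count) := by unfold Pre_compute_samples_py; infer_instance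

def pvWitness_compute_samples_py : List (List (List Int)) × Int × Int :=
  ([[[1, 2, 3, 4, 5, 6, 7], [2, 2, 2, 2, 2, 2, 2]]], 1, 3)

def Spec_compute_samples_py (quantized : List (List (List Int))) (num_tracks : Int) (largest_count : Int) (out : List (List (List (Int × Bool)))) : Prop := out = compute_samples_py_alt quantized num_tracks largest_count
instance (quantized : List (List (List Int))) (num_tracks : Int) (largest_count : Int) (out : List (List (List (Int × Bool)))) : Decidable (Spec_compute_samples_py quantized num_tracks largest_count out) := by unfold Spec_compute_samples_py; infer_instance

-- ===== CLAIM (what is proved, stated in full; the proofs are below) =====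
def Claim_equal_compute_samples_py : Prop := ∀ (quantized : List (List (List Int))) (num_tracks : Int) (largest_count : Int), Dom_compute_samples_py quantized num_tracks largest_count → Pre_compute_samples_py quantized num_tracks largest_count → Spec_compute_samples_py quantized num_tracks largest_count (compute_samples_py quantized num_tracks largest_count)

-- ===== LEMMAS AND PROOFS =====
-- value of component c in (possibly out-of-range) row f, with Python's defaults as in the ports
def atv (q : List (List Int)) (c f : Nat) : Int := (q.getD f []).getD c 0

-- closed form of the delta-of-delta stream
def sval (q : List (List Int)) (c f : Nat) : Int :=
  if f = 0 then atv q c 0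
  else if f = 1 then atv q c 1 - atv q c 0
  else atv q c f - 2 * atv q c (f - 1) + atv q c (f - 2)

-- the common specification both per-track bodies are proved equal to
def specTrack (q : List (List Int)) (lc : Int) : List (List (Int × Bool)) :=
  (List.range lc.toNat).map (fun f => (List.range 7).map (fun c => (sval q c f, true)))

theorem map_range_set {α : Type} (n m : Nat) (F : Nat → α) (v : α) :
    ((List.range n).map F).set m v = (List.range n).map (fun f => if f = m then v else F f) := by
  apply List.ext_getElem
  · simp
  · intro i h1 h2
    simp only [List.getElem_set, List.getElem_map, List.getElem_range]
    by_cases h : m = i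
    · simp [h]
    · simp only [if_neg h, if_neg (fun hh : i = m => h hh.symm)]

theorem getD_map_range' {α : Type} (n m : Nat) (F : Nat → α) (d : α) (hm : m < n) :
    ((List.range n).map F).getD m d = F m := by
  simp [List.getD, hm]

theorem pad_ge (q : List (List Int)) (lc : Int) : lc ≤ ((pyPadTrack q lc).length : Int) := by
  rw [pyPadTrack]
  split
  next h => exact pad_ge _ _
  next h => omega
termination_by (lc - q.length).toNat
decreasing_by simp_all; omega

theorem colA_loop (q : List (List Int)) (c : Nat) (n : Nat) (hn : (n : Int) < (q.length : Int)) :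
    (PySem.List.pyRange 1 ((n : Int) + 1) 1).foldl
      (fun (st : Int × Int × List (Int × Bool)) j =>
        let cur_val := if j < (q.length : Int) then PySem.List.pyGetD (PySem.List.pyGetD q j []) c 0
                       else PySem.List.pyGetD (PySem.List.pyGetD q (-1) []) c 0
        let delta := cur_val - st.1
        let dod := delta - st.2.1
        (cur_val, delta, st.2.2 ++ [(dod, true)]))
      (atv q c 0, 0, [(atv q c 0, true)])
    = (atv q c n, (if n = 0 then 0 else atv q c n - atv q c (n - 1)),
       (List.range (n + 1)).map (fun f => (sval q c f, true))) := by
  induction n with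
  | zero =>
      rw [PySem.List.pyRange_one_eq_nil (by omega)]
      simp [sval]
  | succ n ih =>
      have h1 : ((n + 1 : Nat) : Int) + 1 = ((n : Int) + 1) + 1 := by omega
      rw [h1, PySem.List.pyRange_one_succ_right (by omega), List.foldl_append,
          ih (by omega), List.foldl_cons, List.foldl_nil]
      have hc : ((n : Int) + 1) = ((n + 1 : Nat) : Int) := by omega
      simp only [hc, if_pos hn, PySem.List.pyGetD_natCast]
      refine Prod.ext rfl (Prod.ext ?_ ?_)
      · simp only [if_neg (Nat.succ_ne_zero n), Nat.add_sub_cancel]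
        rfl
      · simp only [List.range_succ, List.map_append, List.map_cons, List.map_nil]
        congr 2
        rcases Nat.eq_zero_or_pos n with h | h
        · subst h; simp [sval, atv]
        · have e1 : n + 1 - 1 = n := by omega
          have e2 : n + 1 - 2 = n - 1 := by omega
          simp only [sval, atv, if_neg (by omega : ¬ n + 1 = 0), if_neg (by omega : ¬ n + 1 = 1),
            if_neg (by omega : ¬ n = 0), e1, e2]
          ring_nf

theorem colA (q : List (List Int)) (c : Nat) (lc : Int) (hlen : lc ≤ (q.length : Int)) :
    compSamplesA q c lc = (List.range (max lc.toNat 1)).map (fun f => (sval q c f, true)) := by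
  unfold compSamplesA
  by_cases h : 1 ≤ lc
  · obtain ⟨n, hn⟩ : ∃ n : Nat, lc = (n : Int) + 1 := ⟨(lc - 1).toNat, by omega⟩
    subst hn
    have hm : max ((n : Int) + 1).toNat 1 = n + 1 := by omega
    simp only [hm]
    have h0 : PySem.List.pyGetD (PySem.List.pyGetD q 0 []) (c : Int) 0 = atv q c 0 := by
      simp only [PySem.List.pyGetD_natCast, PySem.List.pyGetD_zero]
      rfl
    simp only [h0]
    rw [colA_loop q c n (by omega)]
  · rw [PySem.List.pyRange_one_eq_nil (by omega)]
    have hm : max lc.toNat 1 = 1 := by omega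
    simp only [hm, List.foldl_nil, List.range_one, List.map_cons, List.map_nil]
    simp only [PySem.List.pyGetD_natCast, PySem.List.pyGetD_zero, sval]
    rfl

theorem innerA_loop (q : List (List Int)) (lc : Int) (k : Nat) (hk : k < 7) (hlen : lc ≤ (q.length : Int))
    (_hlc : 1 ≤ lc) (m : Nat) (hm : m ≤ lc.toNat) :
    (PySem.List.pyRange 0 (m : Int) 1).foldl
      (fun samples f =>
        if ((PySem.List.pyGetD samples f []).length : Int) < 7 then
          samples.set f.toNat (PySem.List.pyGetD samples f [] ++ [PySem.List.pyGetD (compSamplesA q k lc) f (0, true)])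
        else
          samples.set f.toNat ((PySem.List.pyGetD samples f []).set k (PySem.List.pyGetD (compSamplesA q k lc) f (0, true))))
      ((List.range lc.toNat).map (fun f => (List.range k).map (fun c => (sval q c f, true))))
    = (List.range lc.toNat).map (fun f =>
        if f < m then (List.range (k + 1)).map (fun c => (sval q c f, true))
        else (List.range k).map (fun c => (sval q c f, true))) := by
  induction m with
  | zero =>
      rw [PySem.List.pyRange_one_eq_nil (by omega)]
      simp
  | succ m ihm =>
      have h1 : ((m + 1 : Nat) : Int) = (m : Int) + 1 := by omega
      rw [h1, PySem.List.pyRange_one_succ_right (by omega), List.foldl_append,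
          ihm (by omega), List.foldl_cons, List.foldl_nil]
      have hmlt : m < lc.toNat := by omega
      have hmax : m < max lc.toNat 1 := by omega
      rw [colA q k lc hlen]
      simp only [PySem.List.pyGetD_natCast, getD_map_range' _ _ _ _ hmlt,
        getD_map_range' _ _ _ _ hmax, if_neg (lt_irrefl m), List.length_map,
        List.length_range, if_pos (show ((k : Nat) : Int) < 7 by exact_mod_cast hk),
        Int.toNat_natCast, map_range_set]
      refine List.map_congr_left (fun f _ => ?_)
      by_cases hf : f = m
      · subst hf
        simp [List.range_succ]
      · by_cases hf2 : f < m
        · simp only [if_neg hf, if_pos hf2, if_pos (by omega : f < m + 1)]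
        · simp only [if_neg hf, if_neg hf2, if_neg (by omega : ¬ f < m + 1)]

theorem innerA_full (q : List (List Int)) (lc : Int) (k : Nat) (hk : k < 7)
    (hlen : lc ≤ (q.length : Int)) (hlc : 1 ≤ lc) :
    (PySem.List.pyRange 0 lc 1).foldl
      (fun samples f =>
        if ((PySem.List.pyGetD samples f []).length : Int) < 7 then
          samples.set f.toNat (PySem.List.pyGetD samples f [] ++ [PySem.List.pyGetD (compSamplesA q k lc) f (0, true)])
        else
          samples.set f.toNat ((PySem.List.pyGetD samples f []).set k (PySem.List.pyGetD (compSamplesA q k lc) f (0, true))))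
      ((List.range lc.toNat).map (fun f => (List.range k).map (fun c => (sval q c f, true))))
    = (List.range lc.toNat).map (fun f => (List.range (k + 1)).map (fun c => (sval q c f, true))) := by
  have h : lc = ((lc.toNat : Nat) : Int) := by omega
  rw [h] at hlen ⊢
  rw [innerA_loop q _ k hk hlen (by omega) lc.toNat (by omega)]
  refine List.map_congr_left (fun f hf => ?_)
  have := List.mem_range.mp hf
  split_ifs with hc
  · rfl
  · exact absurd (by omega) hc

theorem trackA_asm (q : List (List Int)) (lc : Int) (hlen : lc ≤ (q.length : Int)) (hlc : 1 ≤ lc) :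
    ∀ k, k ≤ 7 →
    (List.range k).foldl
      (fun samples c =>
        let cs := compSamplesA q c lc
        let samples := if samples = [] then List.replicate lc.toNat ([] : List (Int × Bool)) else samples
        (PySem.List.pyRange 0 lc 1).foldl
          (fun samples f =>
            let row := PySem.List.pyGetD samples f []
            if (row.length : Int) < 7 then
              samples.set f.toNat (row ++ [PySem.List.pyGetD cs f (0, true)])
            else
              samples.set f.toNat (row.set c (PySem.List.pyGetD cs f (0, true))))
          samples)
      []
    = if k = 0 then []
      else (List.range lc.toNat).map (fun f => (List.range k).map (fun c => (sval q c f, true))) := by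
  intro k
  induction k with
  | zero => intro _; rfl
  | succ k ih =>
      intro hk7
      rw [List.range_succ, List.foldl_append, ih (by omega), List.foldl_cons, List.foldl_nil]
      simp only []
      rcases Nat.eq_zero_or_pos k with hk0 | hk0
      · subst hk0
        simp only [if_true]
        have hrep : List.replicate lc.toNat ([] : List (Int × Bool))
            = (List.range lc.toNat).map (fun f => (List.range 0).map (fun c => (sval q c f, true))) := by
          simp [List.map_const']
        rw [hrep, innerA_full q lc 0 (by omega) hlen hlc]
        simp
      · have hne : (List.range lc.toNat).map
            (fun f => (List.range k).map (fun c => (sval q c f, true))) ≠ [] := by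
          simp only [ne_eq, List.map_eq_nil_iff, List.range_eq_nil]
          omega
        simp only [if_neg (by omega : ¬ k = 0), if_neg hne,
          if_neg (by omega : ¬ k + 1 = 0)]
        rw [← List.range_succ]
        exact innerA_full q lc k (by omega) hlen hlc

theorem trackA_spec (q : List (List Int)) (lc : Int) (hlen : lc ≤ (q.length : Int)) :
    trackA q lc = specTrack q lc := by
  unfold trackA specTrack
  by_cases hlc : 1 ≤ lc
  · rw [trackA_asm q lc hlen hlc 7 (le_refl _)]
    simp
  · have h0 : lc.toNat = 0 := by omega
    rw [PySem.List.pyRange_one_eq_nil (by omega)]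
    simp only [h0, List.replicate_zero, List.foldl_nil, List.range_zero, List.map_nil]
    have : ∀ (l : List Nat) (s : List (List (Int × Bool))), s = [] →
        List.foldl (fun (samples : List (List (Int × Bool))) (_ : Nat) =>
          if samples = [] then ([] : List (List (Int × Bool))) else samples) s l = [] := by
      intro l
      induction l with
      | nil => intro s hs; simpa using hs
      | cons a t iht => intro s hs; subst hs; exact iht _ (by simp)
    exact this _ _ rfl

theorem innerB_aux (q : List (List Int)) (n : Nat) : ∀ k, k ≤ 7 →
    (List.range k).foldl
      (fun (acc : List (Int × Bool) × List Int × List Int) (c : Nat) =>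
        (acc.1 ++ [(PySem.List.pyGetD (PySem.List.pyGetD q ((n : Int) + 1) []) (c : Int) 0 - acc.2.1.getD c 0
            - acc.2.2.getD c 0, true)],
         acc.2.1.set c (PySem.List.pyGetD (PySem.List.pyGetD q ((n : Int) + 1) []) (c : Int) 0),
         acc.2.2.set c (PySem.List.pyGetD (PySem.List.pyGetD q ((n : Int) + 1) []) (c : Int) 0 - acc.2.1.getD c 0)))
      ([], (List.range 7).map (fun c => atv q c n),
           (List.range 7).map (fun c => if n = 0 then 0 else atv q c n - atv q c (n - 1)))
    = ((List.range k).map (fun c => (sval q c (n + 1), true)),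
       (List.range 7).map (fun c => if c < k then atv q c (n + 1) else atv q c n),
       (List.range 7).map (fun c => if c < k then atv q c (n + 1) - atv q c n
          else if n = 0 then 0 else atv q c n - atv q c (n - 1))) := by
  intro k
  induction k with
  | zero =>
      intro _
      simp only [List.range_zero, List.foldl_nil, List.map_nil]
      simp only [Prod.mk.injEq]
      refine ⟨trivial, ?_, ?_⟩ <;>
        · refine List.map_congr_left (fun c _ => ?_)
          simp
  | succ k ih =>
      intro hk7
      have hk : k < 7 := by omega
      rw [show List.range (k + 1) = List.range k ++ [k] from List.range_succ,
          List.foldl_append, ih (by omega), List.foldl_cons, List.foldl_nil]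
      have hcast : ((n : Int) + 1) = ((n + 1 : Nat) : Int) := by omega
      have hcur : PySem.List.pyGetD (PySem.List.pyGetD q ((n : Int) + 1) []) ((k : Nat) : Int) 0
          = atv q k (n + 1) := by
        rw [hcast]
        simp only [PySem.List.pyGetD_natCast]
        rfl
      simp only [hcur, getD_map_range' _ _ _ _ hk, if_neg (lt_irrefl k), map_range_set,
        Prod.mk.injEq]
      refine ⟨?_, ?_, ?_⟩
      · simp only [List.map_append, List.map_cons, List.map_nil]
        congr 2
        rcases Nat.eq_zero_or_pos n with h | h
        · subst h; simp [sval, atv]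
        · have e1 : n + 1 - 1 = n := by omega
          have e2 : n + 1 - 2 = n - 1 := by omega
          simp only [sval, atv, if_neg (by omega : ¬ n + 1 = 0), if_neg (by omega : ¬ n + 1 = 1),
            if_neg (by omega : ¬ n = 0), e1, e2]
          ring_nf
      · refine List.map_congr_left (fun c _ => ?_)
        by_cases h1 : c = k
        · subst h1; simp
        · by_cases h2 : c < k
          · simp only [if_neg h1, if_pos h2, if_pos (by omega : c < k + 1)]
          · simp only [if_neg h1, if_neg h2, if_neg (by omega : ¬ c < k + 1)]
      · refine List.map_congr_left (fun c _ => ?_)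
        by_cases h1 : c = k
        · subst h1; simp
        · by_cases h2 : c < k
          · simp only [if_neg h1, if_pos h2, if_pos (by omega : c < k + 1)]
          · simp only [if_neg h1, if_neg h2, if_neg (by omega : ¬ c < k + 1)]

theorem loopB (q : List (List Int)) (n : Nat) (rows0 : List (List (Int × Bool))) :
    (PySem.List.pyRange 1 ((n : Int) + 1) 1).foldl
      (fun (st : List Int × List Int × List (List (Int × Bool))) j =>
        let inner := (List.range 7).foldl
          (fun (acc : List (Int × Bool) × List Int × List Int) (c : Nat) =>
            let cur := PySem.List.pyGetD (PySem.List.pyGetD q j []) (c : Int) 0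
            let delta := cur - acc.2.1.getD c 0
            (acc.1 ++ [(delta - acc.2.2.getD c 0, true)], acc.2.1.set c cur, acc.2.2.set c delta))
          ([], st.1, st.2.1)
        (inner.2.1, inner.2.2, st.2.2 ++ [inner.1]))
      ((List.range 7).map (fun c => atv q c 0), List.replicate 7 (0 : Int), rows0)
    = ((List.range 7).map (fun c => atv q c n),
       (List.range 7).map (fun c => if n = 0 then 0 else atv q c n - atv q c (n - 1)),
       rows0 ++ (List.range n).map (fun f => (List.range 7).map (fun c => (sval q c (f + 1), true)))) := by
  induction n with
  | zero =>
      rw [PySem.List.pyRange_one_eq_nil (by omega)]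
      simp only [List.foldl_nil, List.range_zero, List.map_nil, List.append_nil, Prod.mk.injEq]
      refine ⟨trivial, ?_, trivial⟩
      simp [List.map_const']
  | succ n ih =>
      have h1 : ((n + 1 : Nat) : Int) + 1 = ((n : Int) + 1) + 1 := by omega
      rw [h1, PySem.List.pyRange_one_succ_right (by omega), List.foldl_append, ih,
          List.foldl_cons, List.foldl_nil]
      simp only []
      simp only [innerB_aux q n 7 (le_refl _), Prod.mk.injEq]
      refine ⟨?_, ?_, ?_⟩
      · refine List.map_congr_left (fun c hc => ?_)
        rw [if_pos (List.mem_range.mp hc)]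
      · refine List.map_congr_left (fun c hc => ?_)
        rw [if_pos (List.mem_range.mp hc), if_neg (Nat.succ_ne_zero n), Nat.add_sub_cancel]
      · rw [List.append_assoc, show List.range (n + 1) = List.range n ++ [n] from List.range_succ,
            List.map_append, List.map_cons, List.map_nil]

theorem trackB_spec (q : List (List Int)) (lc : Int) : trackB q lc = specTrack q lc := by
  unfold trackB specTrack
  simp only []
  have hpv : (List.range 7).map (fun (c : Nat) => PySem.List.pyGetD (PySem.List.pyGetD q 0 []) (c : Int) 0)
      = (List.range 7).map (fun c => atv q c 0) := by
    refine List.map_congr_left (fun c _ => ?_)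
    simp only [PySem.List.pyGetD_natCast, PySem.List.pyGetD_zero]
    rfl
  rw [hpv]
  by_cases hlc : 1 ≤ lc
  · obtain ⟨n, hn⟩ : ∃ n : Nat, lc = (n : Int) + 1 := ⟨(lc - 1).toNat, by omega⟩
    subst hn
    rw [if_pos hlc]
    simp only [loopB q n]
    have ht : ((n : Int) + 1).toNat = n + 1 := by omega
    rw [ht, show List.range (n + 1) = 0 :: (List.range n).map Nat.succ from List.range_succ_eq_map,
        List.map_cons, List.map_map, List.singleton_append]
    congr 1
    · rw [List.map_map]
      refine List.map_congr_left (fun c _ => ?_)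
      simp [sval]
  · rw [if_neg hlc, PySem.List.pyRange_one_eq_nil (by omega)]
    have h0 : lc.toNat = 0 := by omega
    simp [h0]

theorem track_eq (q : List (List Int)) (lc : Int) (hlen : lc ≤ (q.length : Int)) :
    trackA q lc = trackB q lc := by
  rw [trackA_spec q lc hlen, trackB_spec]

-- ===== VERDICT (by name: the statement is the Claim_ definition above) =====
theorem compute_samples_py_spec : Claim_equal_compute_samples_py := by
  intro quantized num_tracks largest_count _ _
  unfold Spec_compute_samples_py compute_samples_py compute_samples_py_alt
  apply PySem.List.foldl_congr_mem
  intro acc tid _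
  simp only []
  rw [track_eq _ _ (pad_ge _ _)]
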